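-- pv_equiv track=rewrite | github.com/FrostSource/alyxlib | lib/interface.py | get_all_possible_selections
-- ===== SOURCE A (Python) =====
-- from typing import TypeVar
--
-- T = TypeVar("T")
--
-- def get_all_possible_selections(items:list[T], search_string:str)->list[T]:
--     matching_items = []
--     search_string = search_string.lower()
--     i = 1
--     for item in items:
--         item_str = str(item).lower()
--         if search_string == str(i) or search_string == item_str:
--             return [item]
--         elif item_str.find(search_string) > -1:
--             matching_items.append(item)
--         i += 1
--     return matching_items
-- ===== SOURCE B (Python) =====
-- def get_all_possible_selections(items, search_string):
--     search_string = search_string.lower()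
--     for i, item in enumerate(items, 1):
--         if search_string == str(i) or search_string == str(item).lower():
--             return [item]
--     return [item for item in items if search_string in str(item).lower()]
-- ===== Notes on version B (the rewrite author's own statement) =====
-- stated objective: simpler
-- what changed: Replaces A's single accumulator-carrying loop with two independent passes: an exact-match search (index or full string) that returns immediately, and otherwise a plain substring filter comprehension, with no accumulator threaded through.
import Mathlib
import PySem

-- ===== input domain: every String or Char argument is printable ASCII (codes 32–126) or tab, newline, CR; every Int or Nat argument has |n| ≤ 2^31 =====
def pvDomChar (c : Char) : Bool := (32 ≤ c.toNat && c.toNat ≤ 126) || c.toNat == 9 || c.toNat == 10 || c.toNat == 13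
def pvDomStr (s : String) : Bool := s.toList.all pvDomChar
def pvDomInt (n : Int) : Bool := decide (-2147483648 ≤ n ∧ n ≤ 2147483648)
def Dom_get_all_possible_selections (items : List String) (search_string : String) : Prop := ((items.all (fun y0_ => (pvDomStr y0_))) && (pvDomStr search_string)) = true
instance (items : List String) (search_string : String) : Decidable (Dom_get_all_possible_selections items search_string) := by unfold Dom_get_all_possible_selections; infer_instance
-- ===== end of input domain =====

-- B replaces A's accumulator-carrying single loop by two independent passes (exact-match search, then substring filter): simpler decomposition, same cost.


-- ===== PORT A =====
-- A's single loop with the accumulator `matching_items`, the 1-based counter `i`, and early return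
def gapsLoopA (ss : String) : List String → Int → List String → List String
  | [], _, acc => acc
  | item :: rest, i, acc =>
    let item_str := PySem.Str.lower item
    if ss = PySem.Int.toStr i ∨ ss = item_str then [item]
    else if PySem.Str.find item_str ss > -1 then gapsLoopA ss rest (i + 1) (acc ++ [item])
    else gapsLoopA ss rest (i + 1) acc

def get_all_possible_selections (items : List String) (search_string : String) : List String :=
  gapsLoopA (PySem.Str.lower search_string) items 1 []

-- ===== PORT B =====
-- B's first pass: find the first exact (index or lowered string) match
def gapsFirstExact (ss : String) : List String → Int → Option String
  | [], _ => none
  | item :: rest, i =>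
    if ss = PySem.Int.toStr i ∨ ss = PySem.Str.lower item then some item
    else gapsFirstExact ss rest (i + 1)

def get_all_possible_selections_alt (items : List String) (search_string : String) : List String :=
  let ss := PySem.Str.lower search_string
  match gapsFirstExact ss items 1 with
  | some item => [item]
  | none => items.filter (fun item => PySem.Str.isIn ss (PySem.Str.lower item))

-- ===== PRECONDITION & SPEC =====
def Spec_get_all_possible_selections (items : List String) (search_string : String) (out : List String) : Prop := out = get_all_possible_selections_alt items search_string
instance (items : List String) (search_string : String) (out : List String) : Decidable (Spec_get_all_possible_selections items search_string out) := by unfold Spec_get_all_possible_selections; infer_instance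

-- ===== CLAIM (what is proved, stated in full; the proofs are below) =====
def Claim_equal_get_all_possible_selections : Prop := ∀ (items : List String) (search_string : String), Dom_get_all_possible_selections items search_string → Spec_get_all_possible_selections items search_string (get_all_possible_selections items search_string)

-- ===== LEMMAS AND PROOFS =====
lemma gapsLoopA_eq (ss : String) (items : List String) :
    ∀ (i : Int) (acc : List String),
      gapsLoopA ss items i acc =
        match gapsFirstExact ss items i with
        | some item => [item]
        | none => acc ++ items.filter (fun item => PySem.Str.isIn ss (PySem.Str.lower item)) := by
  induction items with
  | nil => intro i acc; simp [gapsLoopA, gapsFirstExact]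
  | cons item rest ih =>
    intro i acc
    by_cases hx : ss = PySem.Int.toStr i ∨ ss = PySem.Str.lower item
    · simp [gapsLoopA, gapsFirstExact, hx]
    · have hfind : (PySem.Str.find (PySem.Str.lower item) ss > -1)
          ↔ (PySem.Str.isIn ss (PySem.Str.lower item) = true) := by
        rw [PySem.Str.isIn_iff_infix, ← PySem.Str.find_nonneg_iff]
        omega
      by_cases hin : PySem.Str.isIn ss (PySem.Str.lower item) = true
      · have hgt : PySem.Str.find (PySem.Str.lower item) ss > -1 := hfind.mpr hin
        simp only [PySem.Str.find_eq, PySem.Str.lower, String.toList_ofList] at hgt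
        have hinC := hin
        simp only [PySem.Str.isIn_eq, PySem.Str.lower, String.toList_ofList] at hinC
        simp [gapsLoopA, gapsFirstExact, hx, ih, hgt, hinC]
      · have hgt : ¬ PySem.Str.find (PySem.Str.lower item) ss > -1 := fun h => hin (hfind.mp h)
        simp only [PySem.Str.find_eq, PySem.Str.lower, String.toList_ofList] at hgt
        have hinC := hin
        simp only [PySem.Str.isIn_eq, PySem.Str.lower, String.toList_ofList] at hinC
        simp [gapsLoopA, gapsFirstExact, hx, ih, hgt, hinC]

-- ===== VERDICT (by name: the statement is the Claim_ definition above) =====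
theorem get_all_possible_selections_spec : Claim_equal_get_all_possible_selections := by
  intro items search_string _
  unfold Spec_get_all_possible_selections get_all_possible_selections get_all_possible_selections_alt
  rw [gapsLoopA_eq]
  simp
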